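-- pv_equiv track=rewrite | github.com/qguo-create/Autoformalizer-with-Tool-Feedback | scripts/cat_res.py | has_syntax_pass_in_iterations
-- ===== SOURCE A (Python) =====
-- def has_syntax_pass_in_iterations(result, max_iterations=4):
--     """
--     Check if sample passed syntax check within specified iterations
--     New criteria: Number of failed tools before first successful syntax check < max_iterations
--     """
--     tools = result.get('tools', [])
--     if not tools:
--         return False
--
--     false_count = 0  # Count of tools with pass=False
--
--     for i, tool_result in enumerate(tools):
--         if isinstance(tool_result, dict) and 'pass' in tool_result:
--             if tool_result.get('pass', False) and 'errors' in tool_result: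
--                 # Found first successful syntax check
--                 return false_count < max_iterations
--             else:
--                 false_count += 1
--     return False
-- ===== SOURCE B (Python) =====
-- def has_syntax_pass_in_iterations(result, max_iterations=4):
--     """
--     Check if sample passed syntax check within specified iterations.
--
--     Different algorithmic formulation: instead of locating the first
--     successful syntax check and comparing its failure count with the
--     limit, truncate the relevant entries to a window of the first
--     max_iterations ones and ask whether ANY successful syntax check
--     occurs inside that window.  This is equivalent because the failure
--     count before the first success equals its position among the
--     relevant entries, so that position is < max_iterations exactly when
--     a success appears within the window.
--     """
--     relevant = [t for t in result.get('tools', [])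
--                 if isinstance(t, dict) and 'pass' in t]
--     window = relevant[:max(max_iterations, 0)]
--     return any(t.get('pass', False) and 'errors' in t for t in window)
-- ===== Notes on version B (the rewrite author's own statement) =====
-- stated objective: simpler
-- what changed: Replaces A's stateful failure counter and first-success search by a window test: truncate the relevant entries to the first max_iterations ones and return whether any success lies in that window, so no counter or index comparison is needed.
import Mathlib
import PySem

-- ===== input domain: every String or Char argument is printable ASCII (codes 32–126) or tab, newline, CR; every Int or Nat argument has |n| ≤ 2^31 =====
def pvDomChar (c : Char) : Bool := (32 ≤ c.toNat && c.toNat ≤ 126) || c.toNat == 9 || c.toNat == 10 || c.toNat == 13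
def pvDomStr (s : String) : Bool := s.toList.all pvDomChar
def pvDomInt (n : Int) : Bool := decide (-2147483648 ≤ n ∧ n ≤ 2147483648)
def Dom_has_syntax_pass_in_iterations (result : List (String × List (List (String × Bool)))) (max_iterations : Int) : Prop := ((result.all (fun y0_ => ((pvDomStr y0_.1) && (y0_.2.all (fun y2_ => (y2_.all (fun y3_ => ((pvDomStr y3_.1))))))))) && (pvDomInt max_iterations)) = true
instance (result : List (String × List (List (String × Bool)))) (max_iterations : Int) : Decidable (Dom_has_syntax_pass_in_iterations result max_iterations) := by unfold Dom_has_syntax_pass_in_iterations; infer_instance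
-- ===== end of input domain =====

-- B replaces A's failure counter and first-success search by a window test:
-- truncate the relevant entries to the first max_iterations ones and ask
-- whether any success lies in that window (objective: simpler).

-- shared primitive: Python dict lookup on an association list (first match)
def pvGet? {α : Type} (d : List (String × α)) (k : String) : Option α :=
  match d with
  | [] => none
  | (k', v) :: rest => if k' == k then some v else pvGet? rest k

-- ===== PORT A =====
-- the for-loop with the false_count accumulator (isinstance(t, dict) is always
-- true under the type convention)
def pvALoop (tools : List (List (String × Bool))) (false_count : Int)
    (max_iterations : Int) : Bool :=
  match tools with
  | [] => false
  | t :: rest =>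
    if (pvGet? t "pass").isSome then
      if ((pvGet? t "pass").getD false && (pvGet? t "errors").isSome) then
        decide (false_count < max_iterations)
      else pvALoop rest (false_count + 1) max_iterations
    else pvALoop rest false_count max_iterations

def has_syntax_pass_in_iterations (result : List (String × List (List (String × Bool)))) (max_iterations : Int) : Bool :=
  let tools := (pvGet? result "tools").getD []
  if tools.isEmpty then false
  else pvALoop tools 0 max_iterations

-- ===== PORT B =====
def has_syntax_pass_in_iterations_alt (result : List (String × List (List (String × Bool)))) (max_iterations : Int) : Bool :=
  let relevant := ((pvGet? result "tools").getD []).filter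
    (fun t => (pvGet? t "pass").isSome)
  let window := relevant.take (max max_iterations 0).toNat
  window.any (fun t => (pvGet? t "pass").getD false && (pvGet? t "errors").isSome)

-- ===== PRECONDITION & SPEC =====
def Spec_has_syntax_pass_in_iterations (result : List (String × List (List (String × Bool)))) (max_iterations : Int) (out : Bool) : Prop := out = has_syntax_pass_in_iterations_alt result max_iterations
instance (result : List (String × List (List (String × Bool)))) (max_iterations : Int) (out : Bool) : Decidable (Spec_has_syntax_pass_in_iterations result max_iterations out) := by unfold Spec_has_syntax_pass_in_iterations; infer_instance

-- ===== CLAIM (what is proved, stated in full; the proofs are below) =====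
def Claim_equal_has_syntax_pass_in_iterations : Prop := ∀ (result : List (String × List (List (String × Bool)))) (max_iterations : Int), Dom_has_syntax_pass_in_iterations result max_iterations → Spec_has_syntax_pass_in_iterations result max_iterations (has_syntax_pass_in_iterations result max_iterations)

-- ===== LEMMAS AND PROOFS =====

-- A's loop from accumulator fc returns true iff a success occurs among the
-- first (m - fc) relevant entries.
theorem pvALoop_eq_window (tools : List (List (String × Bool))) (fc m : Int) :
    pvALoop tools fc m =
      (((tools.filter (fun t => (pvGet? t "pass").isSome)).take (m - fc).toNat).any
        (fun t => (pvGet? t "pass").getD false && (pvGet? t "errors").isSome)) := by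
  induction tools generalizing fc with
  | nil => simp [pvALoop]
  | cons t rest ih =>
    by_cases hp : (pvGet? t "pass").isSome
    · by_cases hq : ((pvGet? t "pass").getD false && (pvGet? t "errors").isSome) = true
      · rw [show pvALoop (t :: rest) fc m = decide (fc < m) by simp [pvALoop, hp, hq]]
        simp only [List.filter_cons, hp, if_true]
        rcases lt_or_ge fc m with h | h
        · have : (m - fc).toNat = (m - fc - 1).toNat + 1 := by omega
          rw [this, List.take_succ_cons, List.any_cons, hq]
          simp [h]
        · have : (m - fc).toNat = 0 := by omega
          simp [this, not_lt.mpr h]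
      · rw [show pvALoop (t :: rest) fc m = pvALoop rest (fc + 1) m by
          simp [pvALoop, hp, hq]]
        rw [ih]
        simp only [List.filter_cons, hp, if_true]
        rcases lt_or_ge fc m with h | h
        · have : (m - fc).toNat = (m - (fc + 1)).toNat + 1 := by omega
          rw [this, List.take_succ_cons, List.any_cons]
          simp [hq]
        · have h1 : (m - fc).toNat = 0 := by omega
          have h2 : (m - (fc + 1)).toNat = 0 := by omega
          simp [h1, h2]
    · rw [show pvALoop (t :: rest) fc m = pvALoop rest fc m by simp [pvALoop, hp]]
      rw [ih]
      simp [hp]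

-- ===== VERDICT (by name: the statement is the Claim_ definition above) =====
theorem has_syntax_pass_in_iterations_spec : Claim_equal_has_syntax_pass_in_iterations := by
  intro result m _
  unfold Spec_has_syntax_pass_in_iterations has_syntax_pass_in_iterations
    has_syntax_pass_in_iterations_alt
  cases htools : (pvGet? result "tools").getD [] with
  | nil => simp
  | cons t rest =>
    simp only [List.isEmpty_cons, if_false, Bool.false_eq_true]
    rw [pvALoop_eq_window]
    have h : (m - 0).toNat = (max m 0).toNat := by omega
    rw [h]
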